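-- pv_equiv track=rewrite | github.com/sfitzgerald-x1/pokerena | src/pokerena/agent.py | _split_protocol_message
-- ===== SOURCE A (Python) =====
-- from typing import Any, Callable, Deque, Dict, List, Optional, Protocol
--
-- def _split_protocol_message(payload: str) -> List[tuple[Optional[str], List[str]]]:
--     room_id: Optional[str] = None
--     current_lines: List[str] = []
--     blocks: List[tuple[Optional[str], List[str]]] = []
--     for raw_line in payload.splitlines():
--         line = raw_line.rstrip("\r")
--         if not line:
--             continue
--         if line.startswith(">"):
--             if current_lines:
--                 blocks.append((room_id, current_lines))
--             room_id = line[1:] or None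
--             current_lines = []
--             continue
--         current_lines.append(line)
--     if current_lines:
--         blocks.append((room_id, current_lines))
--     return blocks
-- ===== SOURCE B (Python) =====
-- def _split_protocol_message(payload):
--     # Pass 1: tag every surviving content line with the index of its marker segment.
--     rooms = [None]
--     tagged = []
--     for raw_line in payload.splitlines():
--         line = raw_line.rstrip("\r")
--         if line.startswith(">"):
--             rooms.append(line[1:] or None)
--         elif line:
--             tagged.append((len(rooms) - 1, line))
--     # Pass 2: group consecutive lines of the same segment into blocks.
--     blocks = []
--     for seg, line in tagged:
--         if blocks and blocks[-1][0] == seg: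
--             blocks[-1][2].append(line)
--         else:
--             blocks.append((seg, rooms[seg], [line]))
--     return [(room, lines) for _, room, lines in blocks]
-- ===== Notes on version B (the rewrite author's own statement) =====
-- stated objective: alternative
-- what changed: Replaces A's single flush-on-marker accumulator loop with a two-pass decomposition: pass 1 assigns each content line a per-marker segment index (recording each segment's room), pass 2 groups consecutive equal-segment lines into blocks.
import Mathlib
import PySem

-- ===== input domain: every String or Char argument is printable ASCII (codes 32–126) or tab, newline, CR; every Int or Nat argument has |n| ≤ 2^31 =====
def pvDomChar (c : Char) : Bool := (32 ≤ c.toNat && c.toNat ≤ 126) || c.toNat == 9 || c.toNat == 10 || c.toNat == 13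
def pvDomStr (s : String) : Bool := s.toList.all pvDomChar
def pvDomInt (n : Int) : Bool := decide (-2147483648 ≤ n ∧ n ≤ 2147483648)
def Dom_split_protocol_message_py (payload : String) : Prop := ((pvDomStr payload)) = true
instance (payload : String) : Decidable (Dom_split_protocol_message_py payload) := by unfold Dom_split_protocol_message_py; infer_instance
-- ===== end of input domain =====

-- B replaces A's flush-on-marker accumulator loop by a two-pass decomposition
-- (tag lines with a segment index, then group consecutive equal segments); alternative, not faster.


-- ===== PORT A =====
-- hand port of Python's s.rstrip("\r") (PySem has no rstrip-with-chars): drop all trailing '\r'; exact on all strings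
def pvRstripCR (s : String) : String := String.ofList ((s.toList.reverse.dropWhile (fun c => c == '\r')).reverse)

-- one iteration of A's for-loop; state = (room_id, current_lines, blocks)
def pvAStep (st : Option String × List String × List (Option String × List String)) (raw_line : String) :
    Option String × List String × List (Option String × List String) :=
  let line := pvRstripCR raw_line
  if line = "" then st
  else if PySem.Str.startswith line ">" then
    let blocks := if st.2.1 ≠ [] then st.2.2 ++ [(st.1, st.2.1)] else st.2.2
    let r := PySem.Str.slice line (some 1) none   -- line[1:]
    ((if r = "" then none else some r), ([], blocks))   -- line[1:] or None
  else (st.1, st.2.1 ++ [line], st.2.2)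

def split_protocol_message_py (payload : String) : List (Option String × List String) :=
  let fin := (PySem.Str.splitlines payload).foldl pvAStep (none, [], [])
  if fin.2.1 ≠ [] then fin.2.2 ++ [(fin.1, fin.2.1)] else fin.2.2

-- ===== PORT B =====
-- one iteration of B's pass 1; state = (rooms, tagged)
def pvTagStep (st : List (Option String) × List (Nat × String)) (raw_line : String) :
    List (Option String) × List (Nat × String) :=
  let line := pvRstripCR raw_line
  if PySem.Str.startswith line ">" then
    let r := PySem.Str.slice line (some 1) none   -- line[1:]
    (st.1 ++ [if r = "" then none else some r], st.2)
  else if line ≠ "" then (st.1, st.2 ++ [(st.1.length - 1, line)])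
  else st

-- one iteration of B's pass 2 (grouping): append to the last block if same segment, else start a new block
def pvGroupStep (rooms : List (Option String)) (blocks : List (Nat × Option String × List String))
    (t : Nat × String) : List (Nat × Option String × List String) :=
  match blocks.getLast? with
  | some b =>
      if b.1 = t.1 then blocks.dropLast ++ [(b.1, b.2.1, b.2.2 ++ [t.2])]
      else blocks ++ [(t.1, rooms.getD t.1 none, [t.2])]
  | none => blocks ++ [(t.1, rooms.getD t.1 none, [t.2])]

def split_protocol_message_py_alt (payload : String) : List (Option String × List String) :=
  let st := (PySem.Str.splitlines payload).foldl pvTagStep ([none], [])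
  let blocks := st.2.foldl (pvGroupStep st.1) []
  blocks.map (fun b => (b.2.1, b.2.2))

-- ===== PRECONDITION & SPEC =====
def Spec_split_protocol_message_py (payload : String) (out : List (Option String × List String)) : Prop := out = split_protocol_message_py_alt payload
instance (payload : String) (out : List (Option String × List String)) : Decidable (Spec_split_protocol_message_py payload out) := by unfold Spec_split_protocol_message_py; infer_instance

-- ===== CLAIM (what is proved, stated in full; the proofs are below) =====
def Claim_equal_split_protocol_message_py : Prop := ∀ (payload : String), Dom_split_protocol_message_py payload → Spec_split_protocol_message_py payload (split_protocol_message_py payload)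

-- ===== LEMMAS AND PROOFS =====

def pvProj (b : Nat × Option String × List String) : Option String × List String := (b.2.1, b.2.2)

-- the invariant tying A's loop state to B's pass-1 state (with B's pass 2 run on the current tagged list)
def pvInv (room : Option String) (cur : List String) (blocks : List (Option String × List String))
    (rooms : List (Option String)) (tagged : List (Nat × String)) : Prop :=
  (∃ rs, rooms = rs ++ [room]) ∧
  (∀ t ∈ tagged, t.1 < rooms.length) ∧
  (∀ b ∈ tagged.foldl (pvGroupStep rooms) [], b.1 < rooms.length) ∧
  (if cur = [] then
     (tagged.foldl (pvGroupStep rooms) []).map pvProj = blocks ∧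
     (∀ b, (tagged.foldl (pvGroupStep rooms) []).getLast? = some b → b.1 ≠ rooms.length - 1)
   else ∃ Gp, tagged.foldl (pvGroupStep rooms) [] = Gp ++ [(rooms.length - 1, room, cur)] ∧
        Gp.map pvProj = blocks)

-- extending rooms does not change the grouping of tags whose segments are in range
theorem pvGroup_ext (rooms : List (Option String)) (r : Option String)
    (tagged : List (Nat × String)) (G : List (Nat × Option String × List String))
    (h : ∀ t ∈ tagged, t.1 < rooms.length) :
    tagged.foldl (pvGroupStep (rooms ++ [r])) G = tagged.foldl (pvGroupStep rooms) G := by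
  induction tagged generalizing G with
  | nil => rfl
  | cons t ts ih =>
      simp only [List.foldl_cons]
      rw [show pvGroupStep (rooms ++ [r]) G t = pvGroupStep rooms G t from ?_,
          ih _ (fun x hx => h x (List.mem_cons_of_mem _ hx))]
      have ht : t.1 < rooms.length := h t (List.mem_cons_self)
      unfold pvGroupStep
      have : (rooms ++ [r]).getD t.1 none = rooms.getD t.1 none := by
        simp [List.getD, List.getElem?_append_left ht]
      rw [this]

-- marker line: A flushes and resets; B appends a room and leaves tagged unchanged
theorem pvMarker (newroom room : Option String) (cur : List String)
    (blocks : List (Option String × List String)) (rooms : List (Option String))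
    (tagged : List (Nat × String)) (h : pvInv room cur blocks rooms tagged) :
    pvInv newroom [] (if cur ≠ [] then blocks ++ [(room, cur)] else blocks)
      (rooms ++ [newroom]) tagged := by
  obtain ⟨⟨rs, hrs⟩, htag, hG, hmain⟩ := h
  have hlen : 1 ≤ rooms.length := by subst hrs; simp
  have hext : tagged.foldl (pvGroupStep (rooms ++ [newroom])) [] =
      tagged.foldl (pvGroupStep rooms) [] := pvGroup_ext rooms newroom tagged [] htag
  refine ⟨⟨rooms, rfl⟩, ?_, ?_, ?_⟩
  · intro t ht; have := htag t ht; simp; omega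
  · intro b hb; rw [hext] at hb; have := hG b hb; simp; omega
  · rw [if_pos rfl]
    rw [hext]
    constructor
    · by_cases hc : cur = []
      · simp only [hc] at hmain
        simp only [hc, ne_eq, not_true_eq_false, if_false]
        exact hmain.1
      · simp only [if_neg hc] at hmain
        obtain ⟨Gp, hGe, hGm⟩ := hmain
        simp only [ne_eq, hc, not_false_iff, if_true, hGe, List.map_append]
        rw [hGm]; rfl
    · intro b hb
      have hmem : b ∈ tagged.foldl (pvGroupStep rooms) [] := List.mem_of_getLast? hb
      have := hG b hmem
      simp; omega

-- content line: A appends to current; B tags it with the last segment index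
theorem pvContent (line : String) (room : Option String) (cur : List String)
    (blocks : List (Option String × List String)) (rooms : List (Option String))
    (tagged : List (Nat × String)) (h : pvInv room cur blocks rooms tagged) :
    pvInv room (cur ++ [line]) blocks rooms (tagged ++ [(rooms.length - 1, line)]) := by
  obtain ⟨⟨rs, hrs⟩, htag, hG, hmain⟩ := h
  have hlen : 1 ≤ rooms.length := by subst hrs; simp
  have htag' : ∀ t ∈ tagged ++ [(rooms.length - 1, line)], t.1 < rooms.length := by
    intro t ht
    rcases List.mem_append.1 ht with h1 | h1
    · exact htag t h1
    · simp at h1; subst h1; omega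
  have hfold : (tagged ++ [(rooms.length - 1, line)]).foldl (pvGroupStep rooms) [] =
      pvGroupStep rooms (tagged.foldl (pvGroupStep rooms) []) (rooms.length - 1, line) := by
    rw [List.foldl_append]; rfl
  have hgetD : rooms[rooms.length - 1]?.getD none = room := by
    subst hrs
    have hl : (rs ++ [room]).length - 1 = rs.length := by simp
    rw [hl, List.getElem?_append_right (Nat.le_refl rs.length)]
    simp
  by_cases hc : cur = []
  · -- start a new block
    simp only [hc] at hmain
    obtain ⟨hmap, hlast⟩ := hmain
    have hstep : pvGroupStep rooms (tagged.foldl (pvGroupStep rooms) []) (rooms.length - 1, line) =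
        tagged.foldl (pvGroupStep rooms) [] ++ [(rooms.length - 1, room, [line])] := by
      cases hg : (tagged.foldl (pvGroupStep rooms) []).getLast? with
      | none => simp [pvGroupStep, hg, hgetD]
      | some b =>
          have hne := hlast b hg
          simp [pvGroupStep, hg, hne, hgetD]
    refine ⟨⟨rs, hrs⟩, htag', ?_, ?_⟩
    · intro b hb
      rw [hfold, hstep] at hb
      rcases List.mem_append.1 hb with h1 | h1
      · exact hG b h1
      · simp at h1; subst h1; omega
    · simp only [if_neg (by simp : ¬(cur ++ [line] = []))]
      exact ⟨tagged.foldl (pvGroupStep rooms) [], by rw [hfold, hstep, hc]; simp, hmap⟩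
  · -- merge into the last block
    simp only [if_neg hc] at hmain
    obtain ⟨Gp, hGe, hGm⟩ := hmain
    have hstep : pvGroupStep rooms (tagged.foldl (pvGroupStep rooms) []) (rooms.length - 1, line) =
        Gp ++ [(rooms.length - 1, room, cur ++ [line])] := by
      simp [pvGroupStep, hGe]
    refine ⟨⟨rs, hrs⟩, htag', ?_, ?_⟩
    · intro b hb
      rw [hfold, hstep] at hb
      rcases List.mem_append.1 hb with h1 | h1
      · exact hG b (by rw [hGe]; exact List.mem_append_left _ h1)
      · simp at h1; subst h1; omega
    · simp only [if_neg (by simp : ¬(cur ++ [line] = []))]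
      exact ⟨Gp, by rw [hfold, hstep], hGm⟩

theorem pvStep (raw : String) (room : Option String) (cur : List String)
    (blocks : List (Option String × List String)) (rooms : List (Option String))
    (tagged : List (Nat × String)) (h : pvInv room cur blocks rooms tagged) :
    pvInv (pvAStep (room, cur, blocks) raw).1 (pvAStep (room, cur, blocks) raw).2.1
      (pvAStep (room, cur, blocks) raw).2.2
      (pvTagStep (rooms, tagged) raw).1 (pvTagStep (rooms, tagged) raw).2 := by
  simp only [pvAStep, pvTagStep]
  set line := pvRstripCR raw with hline
  by_cases hempty : line = ""
  · -- blank line: both states unchanged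
    have hsw : PySem.Str.startswith line ">" = false := by rw [hempty]; decide
    simp only [hempty, if_true]
    exact h
  · by_cases hsw : PySem.Str.startswith line ">" = true
    · -- marker line
      simp only [if_neg hempty, if_pos hsw]
      exact pvMarker _ room cur blocks rooms tagged h
    · -- content line
      simp only [if_neg hempty, if_neg hsw, if_pos hempty]
      exact pvContent line room cur blocks rooms tagged h

theorem pvMain (raws : List String) (room : Option String) (cur : List String)
    (blocks : List (Option String × List String)) (rooms : List (Option String))
    (tagged : List (Nat × String)) (h : pvInv room cur blocks rooms tagged) :
    pvInv (raws.foldl pvAStep (room, cur, blocks)).1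
      (raws.foldl pvAStep (room, cur, blocks)).2.1
      (raws.foldl pvAStep (room, cur, blocks)).2.2
      (raws.foldl pvTagStep (rooms, tagged)).1
      (raws.foldl pvTagStep (rooms, tagged)).2 := by
  induction raws generalizing room cur blocks rooms tagged with
  | nil => exact h
  | cons raw rest ih =>
      simp only [List.foldl_cons]
      have h1 := pvStep raw room cur blocks rooms tagged h
      have := ih (pvAStep (room, cur, blocks) raw).1 (pvAStep (room, cur, blocks) raw).2.1
        (pvAStep (room, cur, blocks) raw).2.2
        (pvTagStep (rooms, tagged) raw).1 (pvTagStep (rooms, tagged) raw).2 h1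
      simpa using this

-- ===== VERDICT (by name: the statement is the Claim_ definition above) =====
theorem split_protocol_message_py_spec : Claim_equal_split_protocol_message_py := by
  intro payload _
  unfold Spec_split_protocol_message_py split_protocol_message_py split_protocol_message_py_alt
  have h0 : pvInv none [] [] [none] [] := by
    refine ⟨⟨[], rfl⟩, by simp, by simp [List.foldl], by simp [List.foldl]⟩
  have h := pvMain (PySem.Str.splitlines payload) none [] [] [none] [] h0
  set fa := (PySem.Str.splitlines payload).foldl pvAStep (none, [], []) with hfa
  set fb := (PySem.Str.splitlines payload).foldl pvTagStep ([none], []) with hfb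
  obtain ⟨_, _, _, hmain⟩ : pvInv fa.1 fa.2.1 fa.2.2 fb.1 fb.2 := h
  by_cases hc : fa.2.1 = []
  · simp only [hc] at hmain
    simp only [hc, ne_eq, not_true_eq_false, if_false]
    rw [← hmain.1]
    simp [pvProj]
  · simp only [if_neg hc] at hmain
    obtain ⟨Gp, hGe, hGm⟩ := hmain
    simp only [ne_eq, hc, not_false_iff, if_true, hGe, List.map_append]
    rw [show (fun (b : Nat × Option String × List String) => (b.2.1, b.2.2)) = pvProj from rfl, hGm]
    rfl
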